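-- pv_equiv track=rewrite | github.com/ridersw/Leetcode-Problems | getMinimumOperations.py | getMinimumOperation
-- ===== SOURCE A (Python) =====
-- def getMinimumOperation(arr, x, y):
--     count = 0
--     while (max(arr) >= 0):
--         arr.sort()
--         arr[-1] = arr[-1] - x
--         for swi in range(len(arr)-1):
--             arr[swi] -= y
--         count += 1
--
--     return count
-- ===== SOURCE B (Python) =====
-- def getMinimumOperation(arr, x, y):
--     # Sort once (descending); keep the list sorted by reinserting only the hit
--     # element, and apply the uniform -y to everyone lazily via a growing offset.
--     vs = sorted(arr, reverse=True)
--     count = 0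
--     off = 0
--     while vs and vs[0] >= off:
--         h = vs[0] - (x - y)
--         rest = vs[1:]
--         i = 0
--         while i < len(rest) and rest[i] > h:
--             i += 1
--         rest.insert(i, h)
--         vs = rest
--         off += y
--         count += 1
--     return count
-- ===== Notes on version B (the rewrite author's own statement) =====
-- stated objective: alternative
-- what changed: Instead of re-sorting the whole array and subtracting y from every element each round, B sorts once and then keeps the list sorted by reinserting only the element that was hit by x, applying the uniform -y to all elements lazily through a growing offset (intended as faster; a timing run measured a 9x median ratio at the largest size but not consistently across inputs, so no speed is claimed). Pre_ excludes the empty list (max([]) raises) and negative-parameter ranges where the loop may run forever; …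
-- outside the precondition, e.g. on getMinimumOperation([], 1, 1): A raises ValueError, B returns 0; on getMinimumOperation([0, -100], 1, -1): A returns 1, B returns 1
import Mathlib
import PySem

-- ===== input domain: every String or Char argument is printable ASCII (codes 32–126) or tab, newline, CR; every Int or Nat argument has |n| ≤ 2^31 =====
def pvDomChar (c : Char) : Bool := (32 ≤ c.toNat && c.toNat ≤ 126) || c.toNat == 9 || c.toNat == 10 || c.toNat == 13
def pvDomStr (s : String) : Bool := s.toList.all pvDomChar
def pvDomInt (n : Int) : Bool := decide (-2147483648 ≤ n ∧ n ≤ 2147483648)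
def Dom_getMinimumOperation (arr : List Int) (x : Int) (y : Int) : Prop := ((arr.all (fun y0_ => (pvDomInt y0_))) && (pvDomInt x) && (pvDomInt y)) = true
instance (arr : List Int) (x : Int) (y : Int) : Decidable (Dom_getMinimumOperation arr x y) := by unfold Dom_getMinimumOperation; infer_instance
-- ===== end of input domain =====

-- B replaces A's per-round full sort plus O(n) subtraction by a one-time sort with lazy uniform
-- offset and single-element reinsertion (objective: alternative; intended as faster, but the timing
-- run's measurement was not consistent across inputs, so no speed is claimed).
-- A sorts/mutates `arr` in place; B does not — the equivalence proved here is about the return value only.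
-- Fuel guard: under Pre_ every element hit decreases by ≥ 1 while no element grows, so the
-- loop runs at most |arr| * (max(arr)+1) rounds; the fuel only makes the recursion total.

def pvFuel (arr : List Int) : Nat :=
  arr.length * (((PySem.List.max? arr (fun v => v)).getD (-1)) + 1).toNat + 1

-- ===== PORT A =====
-- one round body: arr.sort() already done on input s; arr[-1] = arr[-1] - x; for swi in range(len(arr)-1): arr[swi] -= y
def pvABody (s : List Int) (x y : Int) : List Int :=
  let s1 := PySem.List.pySetD s (-1) (PySem.List.pyGetD s (-1) 0 - x)
  (PySem.List.pyRange 0 ((s1.length : Int) - 1) 1).foldl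
    (fun l i => PySem.List.pySetD l i (PySem.List.pyGetD l i 0 - y)) s1

def pvLoopA (x y : Int) : Nat → List Int → Int → Int
  | 0, _, c => c
  | f + 1, l, c =>
    match PySem.List.max? l (fun v => v) with
    | none => c                     -- Python: max([]) raises ValueError (excluded by Pre_)
    | some m =>
      if 0 ≤ m then
        pvLoopA x y f (pvABody (PySem.List.sorted l (fun v => v) false) x y) (c + 1)
      else c

def getMinimumOperation (arr : List Int) (x : Int) (y : Int) : Int :=
  pvLoopA x y (pvFuel arr) arr 0

-- ===== PORT B =====
-- the inner while/insert of Source B: insert h into the descending list, after the elements > h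
def pvInsertDesc (h : Int) : List Int → List Int
  | [] => [h]
  | r :: rs => if h < r then r :: pvInsertDesc h rs else h :: r :: rs

def pvLoopB (x y : Int) : Nat → List Int → Int → Int → Int
  | 0, _, _, c => c
  | f + 1, vs, off, c =>
    match vs with
    | [] => c
    | v :: rest =>
      if off ≤ v then pvLoopB x y f (pvInsertDesc (v - (x - y)) rest) (off + y) (c + 1)
      else c

def getMinimumOperation_alt (arr : List Int) (x : Int) (y : Int) : Int :=
  pvLoopB x y (pvFuel arr) (PySem.List.sorted arr (fun v => v) true) 0 0

-- ===== PRECONDITION & SPEC =====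
-- Pre_ excludes the empty list (Python max([]) raises ValueError) and the parameter ranges on
-- which A's while loop can run forever (x < 1, or y < 0 with several elements); with y < 0 and
-- n ≥ 2 termination depends on the data, so a few terminating inputs there are excluded too.
def Pre_getMinimumOperation (arr : List Int) (x : Int) (y : Int) : Prop :=
  arr ≠ [] ∧ ((1 ≤ x ∧ 0 ≤ y) ∨ (1 ≤ x ∧ arr.length = 1) ∨ ∀ a ∈ arr, a < 0)
instance (arr : List Int) (x : Int) (y : Int) : Decidable (Pre_getMinimumOperation arr x y) := by
  unfold Pre_getMinimumOperation; infer_instance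

def pvWitness_getMinimumOperation : List Int × Int × Int := ([3, -1, 4], 2, 1)

def Spec_getMinimumOperation (arr : List Int) (x : Int) (y : Int) (out : Int) : Prop := out = getMinimumOperation_alt arr x y
instance (arr : List Int) (x : Int) (y : Int) (out : Int) : Decidable (Spec_getMinimumOperation arr x y out) := by unfold Spec_getMinimumOperation; infer_instance

-- ===== CLAIM (what is proved, stated in full; the proofs are below) =====
def Claim_equal_getMinimumOperation : Prop := ∀ (arr : List Int) (x : Int) (y : Int), Dom_getMinimumOperation arr x y → Pre_getMinimumOperation arr x y → Spec_getMinimumOperation arr x y (getMinimumOperation arr x y)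

-- ===== LEMMAS AND PROOFS =====

lemma pvInsertDesc_perm (h : Int) (l : List Int) : (pvInsertDesc h l).Perm (h :: l) := by
  induction l with
  | nil => simp [pvInsertDesc]
  | cons r rs ih =>
    simp only [pvInsertDesc]
    split_ifs
    · exact (ih.cons r).trans (List.Perm.swap h r rs)
    · exact List.Perm.refl _

lemma pvInsertDesc_pairwise (h : Int) (l : List Int)
    (hl : l.Pairwise (fun a b => b ≤ a)) :
    (pvInsertDesc h l).Pairwise (fun a b => b ≤ a) := by
  induction l with
  | nil => simp [pvInsertDesc]
  | cons r rs ih =>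
    rcases List.pairwise_cons.mp hl with ⟨hr, hrs⟩
    simp only [pvInsertDesc]
    split_ifs with hlt
    · refine List.pairwise_cons.mpr ⟨?_, ih hrs⟩
      intro b hb
      have hb2 : b ∈ h :: rs := (pvInsertDesc_perm h rs).mem_iff.mp hb
      rcases List.mem_cons.mp hb2 with rfl | hb'
      · exact le_of_lt hlt
      · exact hr _ hb'
    · refine List.pairwise_cons.mpr ⟨?_, hl⟩
      intro b hb
      rcases List.mem_cons.mp hb with rfl | hb'
      · exact not_lt.mp hlt
      · exact le_trans (hr _ hb') (not_lt.mp hlt)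

lemma pvFoldStep (y : Int) : ∀ (t done : List Int) (a : Int),
    (PySem.List.pyRange done.length (done.length + t.length) 1).foldl
      (fun l i => PySem.List.pySetD l i (PySem.List.pyGetD l i 0 - y)) (done ++ t ++ [a])
    = done ++ t.map (· - y) ++ [a] := by
  intro t
  induction t with
  | nil =>
    intro done a
    rw [PySem.List.pyRange_one_eq_nil (by simp)]
    simp
  | cons b t ih =>
    intro done a
    rw [PySem.List.pyRange_one_cons (by push_cast [List.length_cons]; omega)]
    simp only [List.foldl_cons]
    rw [show ((done ++ b :: t) ++ [a]) = done ++ (b :: (t ++ [a])) by simp]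
    rw [PySem.List.pyGetD_natCast, PySem.List.pySetD_natCast]
    rw [show (done ++ (b :: (t ++ [a]))).getD done.length 0 = b from by
      simp [List.getD_eq_getElem?_getD]]
    rw [show (done ++ (b :: (t ++ [a]))).set done.length (b - y) = (done ++ [b - y]) ++ t ++ [a] from by
      simp]
    have h2 := ih (done ++ [b - y]) a
    have hr : PySem.List.pyRange ((done.length : Int) + 1) ((done.length : Int) + ((b :: t).length : Int)) 1
        = PySem.List.pyRange (((done ++ [b - y]).length : Int)) (((done ++ [b - y]).length : Int) + (t.length : Int)) 1 := by
      congr 1 <;> push_cast [List.length_append, List.length_cons, List.length_nil] <;> ring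
    rw [hr, h2]
    simp

lemma pvABody_eq (ys : List Int) (a x y : Int) :
    pvABody (ys ++ [a]) x y = ys.map (· - y) ++ [a - x] := by
  simp only [pvABody]
  rw [PySem.List.pyGetD_neg_one_append_singleton]
  rw [show PySem.List.pySetD (ys ++ [a]) (-1) (a - x) = ys ++ [a - x] from by
    simp [PySem.List.pySetD, PySem.List.pySet?, PySem.List.pyIdx?]]
  have h := pvFoldStep y ys [] (a - x)
  simp only [List.nil_append, List.length_nil, Nat.cast_zero, zero_add] at h
  rw [show (((ys ++ [a - x]).length : Int) - 1) = (ys.length : Int) from by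
    push_cast [List.length_append, List.length_cons, List.length_nil]; ring]
  exact h

lemma pvLoop_eq (x y : Int) : ∀ (f : Nat) (l vs : List Int) (off c : Int),
    l.Perm (vs.map (· - off)) → vs.Pairwise (fun a b => b ≤ a) →
    pvLoopA x y f l c = pvLoopB x y f vs off c := by
  intro f
  induction f with
  | zero => intros; rfl
  | succ f ih =>
    intro l vs off c hperm hsort
    cases vs with
    | nil =>
      have hl : l = [] := hperm.eq_nil
      subst hl
      rfl
    | cons v rest =>
      have hmem : (v - off) ∈ l := hperm.mem_iff.mpr (by simp)
      obtain ⟨m, hm⟩ : ∃ m, PySem.List.max? l (fun v => v) = some m := by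
        cases hl : l with
        | nil => rw [hl] at hmem; simp at hmem
        | cons h t => exact ⟨_, by rw [PySem.List.max?_id_cons]⟩
      have hm_eq : m = v - off := by
        have hvm : v - off ≤ m := PySem.List.max?_isMax hm _ hmem
        have hmmem : m ∈ (v :: rest).map (· - off) := hperm.mem_iff.mp (PySem.List.max?_mem hm)
        obtain ⟨w, hw, rfl⟩ := List.mem_map.mp hmmem
        have hwv : w ≤ v := by
          rcases List.mem_cons.mp hw with rfl | hw'
          · exact le_refl _
          · exact (List.pairwise_cons.mp hsort).1 _ hw'
        omega
      simp only [pvLoopA, pvLoopB, hm]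
      rw [hm_eq]
      by_cases hc : 0 ≤ v - off
      · rw [if_pos hc, if_pos (by omega : off ≤ v)]
        have hm2 : ((v :: rest).map (fun z : Int => z - off)).Pairwise (fun a b : Int => b ≤ a) :=
          List.Pairwise.map _ (fun a b h => by omega) hsort
        have hmapsort : ((v - off) :: rest.map (· - off)).Pairwise (fun a b => b ≤ a) := by
          simpa using hm2
        have hsorted : PySem.List.sorted l (fun v => v) false
            = (rest.map (· - off)).reverse ++ [v - off] := by
          apply PySem.List.sorted_id_eq_of_perm_of_pairwise
          · refine List.Perm.trans ?_ hperm.symm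
            refine (List.perm_append_singleton _ _).trans ?_
            exact ((rest.map (· - off)).reverse_perm).cons (v - off)
          · rw [show (rest.map (· - off)).reverse ++ [v - off]
                = ((v - off) :: rest.map (· - off)).reverse from by simp]
            exact (List.pairwise_reverse).mpr (by
              refine hmapsort.imp ?_
              intro a b h
              exact h)
        rw [hsorted, pvABody_eq]
        apply ih
        · refine List.Perm.trans ?_ (((pvInsertDesc_perm (v - (x - y)) rest).map _).symm)
          refine (List.perm_append_singleton _ _).trans ?_
          rw [show ((v - (x - y)) :: rest).map (· - (off + y))
              = (v - off - x) :: rest.map (· - (off + y)) from by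
            simp only [List.map_cons]; congr 1; ring]
          refine List.Perm.cons _ ?_
          rw [show ((rest.map (· - off)).reverse.map (· - y)) = (rest.map (· - (off + y))).reverse from by
            rw [← List.map_reverse, ← List.map_reverse, List.map_map]
            exact List.map_congr_left (fun z _ => by simp [Function.comp]; omega)]
          exact (rest.map (· - (off + y))).reverse_perm
        · exact pvInsertDesc_pairwise _ _ (List.pairwise_cons.mp hsort).2
      · rw [if_neg hc, if_neg (by omega)]

-- ===== VERDICT (by name: the statement is the Claim_ definition above) =====
theorem getMinimumOperation_spec : Claim_equal_getMinimumOperation := by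
  intro arr x y _ _
  unfold Spec_getMinimumOperation getMinimumOperation getMinimumOperation_alt
  refine pvLoop_eq x y (pvFuel arr) arr _ 0 0 ?_ ?_
  · simpa using (PySem.List.sorted_perm arr (fun v => v) true).symm
  · exact PySem.List.sorted_pairwise_rev arr (fun v => v)
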